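-- pv_equiv track=rewrite | github.com/JeffSteinbok/openclaw-hub | skills/fastmail-send/scripts/caldav_client.py | _ical_unescape
-- ===== SOURCE A (Python) =====
-- def _ical_unescape(s: str) -> str:
--     """Reverse RFC 5545 §3.3.11 text-value escaping.
--
--     Processes the string character by character so that a literal ``\\n``
--     (escaped backslash followed by the letter ``n``) is correctly preserved
--     as backslash + ``n`` rather than being converted to a newline.
--     """
--     result: list[str] = []
--     i = 0
--     while i < len(s):
--         if s[i] == "\\" and i + 1 < len(s):
--             nxt = s[i + 1]
--             if nxt in ("n", "N"):
--                 result.append("\n")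
--             elif nxt == ",":
--                 result.append(",")
--             elif nxt == ";":
--                 result.append(";")
--             elif nxt == "\\":
--                 result.append("\\")
--             else:
--                 result.append("\\")
--                 result.append(nxt)
--             i += 2
--         else:
--             result.append(s[i])
--             i += 1
--     return "".join(result)
-- ===== SOURCE B (Python) =====
-- def _ical_unescape(s: str) -> str:
--     """Reverse RFC 5545 text escaping by staged passes: split the string on
--     backslashes once, then walk the backslash-free parts.  Each part after the
--     first is preceded by one backslash; an empty part means two adjacent
--     backslashes (an escaped backslash, whose following part is then literal),
--     a trailing empty part with no successor is a lone trailing backslash, and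
--     otherwise the part's first character selects the decoded replacement."""
--     parts = s.split("\\")
--     out = [parts[0]]
--     i = 1
--     while i < len(parts):
--         p = parts[i]
--         if p == "":
--             if i + 1 < len(parts):
--                 out.append("\\" + parts[i + 1])
--                 i += 2
--             else:
--                 out.append("\\")
--                 i += 1
--         else:
--             c = p[0]
--             head = "\n" if c in "nN" else (c if c in ",;" else "\\" + c)
--             out.append(head + p[1:])
--             i += 1
--     return "".join(out)
-- ===== Notes on version B (the rewrite author's own statement) =====
-- stated objective: faster
-- what changed: Replaced the character-by-character index loop with lookahead by staged passes: one split on backslash, then a walk over the backslash-free parts where each part's emptiness/first character decides the decoded join.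
import Mathlib
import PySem

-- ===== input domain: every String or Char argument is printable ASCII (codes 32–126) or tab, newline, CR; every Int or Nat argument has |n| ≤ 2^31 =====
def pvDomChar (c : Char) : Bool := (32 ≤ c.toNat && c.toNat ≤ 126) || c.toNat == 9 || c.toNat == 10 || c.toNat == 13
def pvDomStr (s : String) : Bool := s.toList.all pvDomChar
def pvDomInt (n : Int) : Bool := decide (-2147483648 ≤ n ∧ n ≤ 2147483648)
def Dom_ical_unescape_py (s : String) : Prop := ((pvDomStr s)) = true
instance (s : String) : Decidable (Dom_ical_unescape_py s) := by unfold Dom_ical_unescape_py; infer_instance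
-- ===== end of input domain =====

-- B replaces A's character-by-character lookahead loop by staged passes: one split on backslash,
-- then a walk over the backslash-free parts (measurably faster in Python: bulk split/join instead of a per-character loop).

-- ===== PORT A =====
-- A's while loop over index i, stepping 2 on a backslash with a successor, 1 otherwise;
-- ported as the matching two-deep structural recursion on the character list.
def icalGoA : List Char → List Char
  | [] => []
  | '\\' :: nxt :: rest =>
      (if nxt = 'n' ∨ nxt = 'N' then ['\n']
       else if nxt = ',' then [',']
       else if nxt = ';' then [';']
       else if nxt = '\\' then ['\\']
       else ['\\', nxt]) ++ icalGoA rest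
  | c :: rest => c :: icalGoA rest

def ical_unescape_py (s : String) : String := String.mk (icalGoA s.toList)

-- ===== PORT B =====
-- Source B's while loop over parts[1:]: an empty part with a successor is an escaped backslash
-- (the successor part is then literal), a trailing empty part is a lone backslash, and
-- otherwise the part's first character selects the decoded head.
def icalWalk : List (List Char) → List Char
  | [] => []
  | [[]] => ['\\']
  | [] :: q :: ps => '\\' :: (q ++ icalWalk ps)
  | (c :: rest) :: ps =>
      (if c = 'n' ∨ c = 'N' then ['\n']
       else if c = ',' then [',']
       else if c = ';' then [';']
       else ['\\', c]) ++ rest ++ icalWalk ps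

-- Source B: parts = s.split("\\"); out starts as [parts[0]], then the walk over the rest.
def ical_unescape_py_alt (s : String) : String :=
  match s.toList.splitOn '\\' with
  | [] => ""            -- unreachable: split never returns an empty list
  | p :: ps => String.mk (p ++ icalWalk ps)

-- ===== PRECONDITION & SPEC =====
def Spec_ical_unescape_py (s : String) (out : String) : Prop := out = ical_unescape_py_alt s
instance (s : String) (out : String) : Decidable (Spec_ical_unescape_py s out) := by unfold Spec_ical_unescape_py; infer_instance

-- ===== CLAIM (what is proved, stated in full; the proofs are below) =====
def Claim_equal_ical_unescape_py : Prop := ∀ (s : String), Dom_ical_unescape_py s → Spec_ical_unescape_py s (ical_unescape_py s)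

-- ===== LEMMAS AND PROOFS =====

-- joint invariant: A's scan of l equals head-part ++ walk of the remaining parts, and
-- A's scan of '\'::l equals the walk of all parts of l.
theorem icalSplit_inv (l : List Char) :
    (∀ p ps, l.splitOn '\\' = p :: ps → icalGoA l = p ++ icalWalk ps) ∧
    icalGoA ('\\' :: l) = icalWalk (l.splitOn '\\') := by
  induction l with
  | nil =>
    refine ⟨?_, ?_⟩
    · intro p ps h
      rw [List.splitOn, List.splitOnP_nil] at h
      injection h with h1 h2
      subst h1; subst h2; rfl
    · rw [List.splitOn, List.splitOnP_nil]; rfl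
  | cons c rest ih =>
    obtain ⟨q, ps, hq⟩ : ∃ q ps, rest.splitOn '\\' = q :: ps := by
      cases h : rest.splitOn '\\' with
      | nil => exact absurd h (List.splitOnP_ne_nil _ _)
      | cons a b => exact ⟨a, b, rfl⟩
    by_cases hb : c = '\\'
    · subst hb
      have hsp : ('\\' :: rest).splitOn '\\' = [] :: rest.splitOn '\\' := by
        simp [List.splitOn, List.splitOnP_cons]
      refine ⟨?_, ?_⟩
      · intro p ps' h
        rw [hsp] at h
        injection h with h1 h2
        subst h1; subst h2
        exact ih.2
      · rw [hsp, hq,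
           show icalGoA ('\\' :: '\\' :: rest) = '\\' :: icalGoA rest from rfl,
           ih.1 q ps hq]
        rfl
    · have hsp : (c :: rest).splitOn '\\' = (c :: q) :: ps := by
        simp only [List.splitOn, List.splitOnP_cons] at *
        simp [hb, hq]
      have hA : icalGoA (c :: rest) = c :: icalGoA rest := by
        conv_lhs => rw [icalGoA.eq_def]
        split
        · simp_all
        · rename_i heq; exact absurd (by injection heq) hb
        · rename_i heq
          injection heq with h1 h2
          subst h1; subst h2; rfl
      refine ⟨?_, ?_⟩
      · intro p ps' h
        rw [hsp] at h
        injection h with h1 h2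
        subst h1; subst h2
        rw [hA, ih.1 q ps hq]; rfl
      · rw [hsp,
           show icalGoA ('\\' :: c :: rest) =
            (if c = 'n' ∨ c = 'N' then ['\n']
             else if c = ',' then [',']
             else if c = ';' then [';']
             else if c = '\\' then ['\\']
             else ['\\', c]) ++ icalGoA rest from rfl,
           ih.1 q ps hq, icalWalk]
        simp [hb]

-- ===== VERDICT (by name: the statement is the Claim_ definition above) =====
theorem ical_unescape_py_spec : Claim_equal_ical_unescape_py := by
  intro s _
  show String.mk (icalGoA s.toList) = ical_unescape_py_alt s
  unfold ical_unescape_py_alt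
  cases h : s.toList.splitOn '\\' with
  | nil => exact absurd h (List.splitOnP_ne_nil _ _)
  | cons p ps => rw [(icalSplit_inv s.toList).1 p ps h]
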